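-- pv_equiv track=rewrite | github.com/Michelleeby/tidal-language-model | plugins/tidal/TrajectoryAnalyzer.py | _split_windows
-- ===== SOURCE A (Python) =====
-- def _split_windows(values, n_windows=4):
--     """Split values into n_windows roughly equal-sized sublists."""
--     k = len(values)
--     base_size = k // n_windows
--     remainder = k % n_windows
--     windows = []
--     start = 0
--     for i in range(n_windows):
--         size = base_size + (1 if i < remainder else 0)
--         windows.append(values[start: start + size])
--         start += size
--     return windows
-- ===== SOURCE B (Python) =====
-- def _split_windows(values, n_windows=4):
--     """Split values into n_windows roughly equal-sized sublists."""
--     windows = []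
--     rest = values
--     remaining = n_windows
--     while remaining > 0:
--         size = -(-len(rest) // remaining)  # ceil division: this window's share of what is left
--         windows.append(rest[:size])
--         rest = rest[size:]
--         remaining -= 1
--     return windows
-- ===== Notes on version B (the rewrite author's own statement) =====
-- stated objective: alternative
-- what changed: Replaces the single pass that precomputes base/remainder once and slices by a running start offset with a peeling loop: each step computes only the FIRST window's size as ceil(len(rest)/remaining) via -(-len//n), slices it off the remaining suffix and decrements the window count; no divmod pair and no offset arithmetic.
import Mathlib
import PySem

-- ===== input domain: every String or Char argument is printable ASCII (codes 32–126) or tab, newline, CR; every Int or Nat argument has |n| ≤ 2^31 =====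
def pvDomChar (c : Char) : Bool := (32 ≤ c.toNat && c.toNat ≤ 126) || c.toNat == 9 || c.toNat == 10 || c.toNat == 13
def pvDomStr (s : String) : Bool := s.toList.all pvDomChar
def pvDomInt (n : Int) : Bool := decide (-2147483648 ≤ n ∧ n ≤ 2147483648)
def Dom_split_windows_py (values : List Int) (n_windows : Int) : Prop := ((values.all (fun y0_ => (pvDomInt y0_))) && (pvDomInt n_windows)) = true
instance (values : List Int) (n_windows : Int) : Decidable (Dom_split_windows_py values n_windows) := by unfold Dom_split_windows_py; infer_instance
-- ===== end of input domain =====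

-- B replaces A's accumulator loop (precomputed base/remainder, running start offset) with a
-- peeling loop: repeatedly slice off the first window of size ceil(len(rest)/remaining) from
-- what is left (alternative decomposition, not claimed faster).
-- ===== PORT A =====
def split_windows_py (values : List Int) (n_windows : Int) : List (List Int) :=
  let k : Int := values.length
  let base_size := PySem.Int.floordiv k n_windows
  let remainder := PySem.Int.mod k n_windows
  ((PySem.List.pyRange 0 n_windows 1).foldl
    (fun (st : List (List Int) × Int) i =>
      let size := base_size + (if i < remainder then 1 else 0)
      (st.1 ++ [PySem.List.slice values (some st.2) (some (st.2 + size))], st.2 + size))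
    ([], 0)).1

-- ===== PORT B =====
-- B's while loop peels one window per iteration, decrementing `remaining` until it hits 0;
-- it is transcribed structurally on the Nat counter n_windows.toNat (the loop guard is the 0 case).
def split_windows_py_alt_go (values : List Int) : Nat → List (List Int)
  | 0 => []
  | m + 1 =>
    let size := -(PySem.Int.floordiv (-(values.length : Int)) ((m : Int) + 1))
    PySem.List.slice values none (some size) ::
      split_windows_py_alt_go (PySem.List.slice values (some size) none) m

def split_windows_py_alt (values : List Int) (n_windows : Int) : List (List Int) :=
  split_windows_py_alt_go values n_windows.toNat

-- ===== PRECONDITION & SPEC =====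
-- Pre_ excludes n_windows = 0, on which A raises ZeroDivisionError.
def Pre_split_windows_py (values : List Int) (n_windows : Int) : Prop := n_windows ≠ 0
instance (values : List Int) (n_windows : Int) : Decidable (Pre_split_windows_py values n_windows) := by unfold Pre_split_windows_py; infer_instance
def pvWitness_split_windows_py : List Int × Int := ([1, 2, 3, 4, 5], 2)
def Spec_split_windows_py (values : List Int) (n_windows : Int) (out : List (List Int)) : Prop := out = split_windows_py_alt values n_windows
instance (values : List Int) (n_windows : Int) (out : List (List Int)) : Decidable (Spec_split_windows_py values n_windows out) := by unfold Spec_split_windows_py; infer_instance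

-- ===== CLAIM (what is proved, stated in full; the proofs are below) =====
def Claim_equal_split_windows_py : Prop := ∀ (values : List Int) (n_windows : Int), Dom_split_windows_py values n_windows → Pre_split_windows_py values n_windows → Spec_split_windows_py values n_windows (split_windows_py values n_windows)

-- ===== LEMMAS AND PROOFS =====

-- closed-form step for the min-based window boundary
lemma min_step (i rem : Int) : min (i + 1) rem = min i rem + (if i < rem then 1 else 0) := by
  rcases lt_or_ge i rem with h | h <;> simp [min_def] <;> omega

-- A's loop from index a (with accumulated windows ws and offset a*base+min a rem)
-- produces ws followed by the closed-form windows for indices a..b-1.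
lemma loop_closed (values : List Int) (base rem : Int) :
    ∀ m : Nat, ∀ a b : Int, (b - a).toNat = m → ∀ ws : List (List Int),
      ((PySem.List.pyRange a b 1).foldl
        (fun (st : List (List Int) × Int) i =>
          let size := base + (if i < rem then 1 else 0)
          (st.1 ++ [PySem.List.slice values (some st.2) (some (st.2 + size))], st.2 + size))
        (ws, a * base + min a rem)).1
      = ws ++ (PySem.List.pyRange a b 1).map (fun i =>
          PySem.List.slice values (some (i * base + min i rem)) (some ((i + 1) * base + min (i + 1) rem))) := by
  intro m
  induction m with
  | zero =>
    intro a b hm ws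
    rw [PySem.List.pyRange_one_eq_nil (by omega)]
    simp
  | succ m ih =>
    intro a b hm ws
    rw [PySem.List.pyRange_one_cons (by omega)]
    simp only [List.foldl_cons, List.map_cons]
    have hstep : a * base + min a rem + (base + (if a < rem then 1 else 0))
        = (a + 1) * base + min (a + 1) rem := by
      rw [min_step]; ring
    rw [hstep]
    have := ih (a + 1) b (by omega)
      (ws ++ [PySem.List.slice values (some (a * base + min a rem)) (some ((a + 1) * base + min (a + 1) rem))])
    simp only [List.append_assoc] at this ⊢
    exact this

-- shifting a range by one
lemma pyRange_shift (a b : Int) :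
    PySem.List.pyRange (a + 1) (b + 1) 1 = (PySem.List.pyRange a b 1).map (· + 1) := by
  by_cases h : a < b
  · have hm : ∃ m : Nat, (b - a).toNat = m := ⟨_, rfl⟩
    obtain ⟨m, hm⟩ := hm
    induction m generalizing a with
    | zero => omega
    | succ m ih =>
      rw [PySem.List.pyRange_one_cons h, PySem.List.pyRange_one_cons (by omega), List.map_cons]
      by_cases h2 : a + 1 < b
      · rw [ih (a + 1) h2 (by omega)]
      · rw [PySem.List.pyRange_one_eq_nil (by omega : b ≤ a + 1),
            PySem.List.pyRange_one_eq_nil (by omega : b + 1 ≤ a + 1 + 1)]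
        simp
  · rw [PySem.List.pyRange_one_eq_nil (by omega), PySem.List.pyRange_one_eq_nil (by omega)]
    simp

-- a nonneg slice of a dropped prefix is the shifted slice of the original
lemma slice_shift (xs : List Int) (s a b : Int) (hs : 0 ≤ s) (ha : 0 ≤ a) (hb : 0 ≤ b) :
    PySem.List.slice (xs.drop s.toNat) (some a) (some b)
      = PySem.List.slice xs (some (a + s)) (some (b + s)) := by
  rw [PySem.List.slice_toNat _ ha hb, PySem.List.slice_toNat _ (by omega) (by omega),
      List.drop_drop]
  congr 1
  · omega
  · congr 1
    omega

-- B's recursion equals the closed-form windows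
lemma alt_go_closed : ∀ (m : Nat) (values : List Int),
    split_windows_py_alt_go values m
      = (PySem.List.pyRange 0 (m : Int) 1).map (fun i =>
          PySem.List.slice values
            (some (i * PySem.Int.floordiv (values.length : Int) (m : Int) + min i (PySem.Int.mod (values.length : Int) (m : Int))))
            (some ((i + 1) * PySem.Int.floordiv (values.length : Int) (m : Int) + min (i + 1) (PySem.Int.mod (values.length : Int) (m : Int))))) := by
  intro m
  induction m with
  | zero =>
    intro values
    rw [split_windows_py_alt_go, PySem.List.pyRange_one_eq_nil (by norm_num)]
    simp
  | succ m ih =>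
    intro values
    set n : Int := ((m : Int) + 1) with hn'
    have hn : 0 < n := by positivity
    set k : Int := (values.length : Int) with hk
    have hk0 : 0 ≤ k := by positivity
    set base := PySem.Int.floordiv k n with hbase
    set rem := PySem.Int.mod k n with hrem
    have hkeq : base * n + rem = k := PySem.Int.floordiv_mul_add_mod k n
    have hrem0 : 0 ≤ rem := PySem.Int.mod_nonneg k hn
    have hremn : rem < n := PySem.Int.mod_lt k hn
    have hbase0 : 0 ≤ base := by nlinarith
    set s : Int := base + (if 0 < rem then 1 else 0) with hs
    have hsize : -(PySem.Int.floordiv (-k) n) = s := by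
      rw [PySem.Int.neg_floordiv_neg_eq_iff_of_pos hn]
      constructor
      · by_cases h : 0 < rem <;> simp [hs, h] <;> nlinarith
      · by_cases h : 0 < rem <;> simp [hs, h] <;> nlinarith
    have hs0 : 0 ≤ s := by by_cases h : 0 < rem <;> simp [hs, h] <;> omega
    have hsk : s ≤ k := by by_cases h : 0 < rem <;> simp [hs, h] <;> nlinarith
    rw [split_windows_py_alt_go]
    simp only [Nat.cast_succ] at *
    rw [hsize]
    rw [PySem.List.pyRange_one_cons hn, List.map_cons]
    have hhead : PySem.List.slice values none (some s)
        = PySem.List.slice values (some ((0:Int) * base + min 0 rem)) (some (((0:Int) + 1) * base + min ((0:Int) + 1) rem)) := by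
      have h1 : (0:Int) * base + min 0 rem = 0 := by simp [min_eq_left hrem0]
      have h2 : ((0:Int) + 1) * base + min ((0:Int) + 1) rem = s := by
        by_cases h : 0 < rem <;> simp [hs, min_def, h] <;> omega
      rw [h1, h2, PySem.List.slice_zero_start]
    rw [hhead]
    congr 1
    have htail : PySem.List.slice values (some s) none = values.drop s.toNat :=
      PySem.List.slice_from values hs0
    rw [htail]
    rw [ih (values.drop s.toNat)]
    have hlen : ((values.drop s.toNat).length : Int) = k - s := by
      rw [List.length_drop]; omega
    rw [hlen]
    by_cases hm0 : m = 0
    · -- one window: both tails are empty maps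
      subst hm0
      rw [PySem.List.pyRange_one_eq_nil (by norm_num),
          PySem.List.pyRange_one_eq_nil (by simp [hn'] : n ≤ 0 + 1)]
      simp
    · have hn2 : (2:Int) ≤ n := by
        have : 1 ≤ m := Nat.one_le_iff_ne_zero.2 hm0
        have : (1:Int) ≤ (m:Int) := by exact_mod_cast this
        omega
      have hrem' : 0 ≤ rem - (if 0 < rem then 1 else 0) := by
        by_cases h : 0 < rem <;> simp [h] <;> omega
      have hmn : (m : Int) = n - 1 := by omega
      have hb' : PySem.Int.floordiv (k - s) ((m : Int)) = base := by
        rw [hmn, PySem.Int.floordiv_eq_iff_of_pos (by omega)]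
        constructor
        · by_cases h : 0 < rem <;> simp [hs, h] <;> nlinarith
        · by_cases h : 0 < rem <;> simp [hs, h] <;> nlinarith
      have hr' : PySem.Int.mod (k - s) ((m : Int)) = rem - (if 0 < rem then 1 else 0) := by
        have h0 := PySem.Int.floordiv_mul_add_mod (k - s) ((m : Int))
        rw [hb'] at h0
        by_cases h : 0 < rem <;> simp [hs, h] at h0 ⊢ <;> nlinarith
      rw [hb', hr']
      have hshift := pyRange_shift 0 (m : Int)
      rw [show n = (m : Int) + 1 from hn']
      rw [hshift, List.map_map]
      apply List.map_congr_left
      intro i hi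
      have hi' := (PySem.List.mem_pyRange_one).1 hi
      simp only [Function.comp]
      have hmin0 : 0 ≤ min i (rem - (if 0 < rem then 1 else 0)) := le_min hi'.1 hrem'
      have hmin1 : 0 ≤ min (i + 1) (rem - (if 0 < rem then 1 else 0)) := le_min (by omega) hrem'
      rw [slice_shift _ s _ _ hs0 (by nlinarith) (by nlinarith)]
      have hbn : PySem.Int.floordiv k ((m : Int) + 1) = base := by rw [← hn']
      have hrn : PySem.Int.mod k ((m : Int) + 1) = rem := by rw [← hn']
      have hminstep : ∀ j : Int, 0 ≤ j →
          min j (rem - (if 0 < rem then 1 else 0)) + (if 0 < rem then 1 else 0) = min (j + 1) rem := by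
        intro j hj
        by_cases h : 0 < rem <;> simp [min_def, h] <;> split_ifs <;> omega
      congr 2
      · rw [hbn, hrn, hs]
        linear_combination hminstep i hi'.1
      · rw [hbn, hrn, hs]
        linear_combination hminstep (i + 1) (by omega)

-- ===== VERDICT (by name: the statement is the Claim_ definition above) =====
theorem split_windows_py_spec : Claim_equal_split_windows_py := by
  intro values n_windows _ hn
  unfold Spec_split_windows_py split_windows_py_alt
  rcases lt_or_ge 0 n_windows with hpos | hle
  · rw [alt_go_closed n_windows.toNat values]
    have hcast : ((n_windows.toNat : Int)) = n_windows := by omega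
    rw [hcast]
    unfold split_windows_py
    have hrem : 0 ≤ PySem.Int.mod (values.length : Int) n_windows := PySem.Int.mod_nonneg _ hpos
    have key := loop_closed values (PySem.Int.floordiv (values.length : Int) n_windows)
      (PySem.Int.mod (values.length : Int) n_windows) (n_windows - 0).toNat 0 n_windows rfl []
    simp only [zero_mul, zero_add, min_eq_left hrem, List.nil_append] at key
    exact key
  · have h0 : n_windows.toNat = 0 := by omega
    rw [h0, split_windows_py_alt_go]
    unfold split_windows_py
    rw [PySem.List.pyRange_one_eq_nil (by omega)]
    simp
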